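-- pv_equiv track=rewrite | github.com/dock108dev/sda | api/app/services/pipeline/stages/classify_game_shape.py | _is_early_avalanche_mlb
-- ===== SOURCE A (Python) =====
-- from typing import Any
--
-- def _is_early_avalanche_mlb(
--     pbp_events: list[dict[str, Any]],
--     flow: dict[str, Any],
-- ) -> bool:
--     """MLB sub-archetype: ≥ ``early_avalanche_runs`` in the first N innings."""
--     runs_threshold = int(flow.get("early_avalanche_runs", 4))
--     inning_threshold = int(flow.get("early_avalanche_innings", 2))
--     end_home = 0
--     end_away = 0
--     for ev in pbp_events:
--         inning = ev.get("quarter") or 0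
--         if inning <= inning_threshold:
--             end_home = ev.get("home_score") or end_home
--             end_away = ev.get("away_score") or end_away
--     return end_home >= runs_threshold or end_away >= runs_threshold
-- ===== SOURCE B (Python) =====
-- from typing import Any
--
-- def _is_early_avalanche_mlb(
--     pbp_events: list[dict[str, Any]],
--     flow: dict[str, Any],
-- ) -> bool:
--     """MLB sub-archetype: >= early_avalanche_runs in the first N innings."""
--     runs_threshold = int(flow.get("early_avalanche_runs", 4))
--     inning_threshold = int(flow.get("early_avalanche_innings", 2))
--
--     def last_score(field):
--         # first truthy score, scanning backwards, among early-inning events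
--         for ev in reversed(pbp_events):
--             if (ev.get("quarter") or 0) <= inning_threshold and ev.get(field):
--                 return ev.get(field)
--         return 0
--
--     return (last_score("home_score") >= runs_threshold
--             or last_score("away_score") >= runs_threshold)
-- ===== Notes on version B (the rewrite author's own statement) =====
-- stated objective: alternative
-- what changed: Replaces the single forward loop mutating two accumulators with two independent backward short-circuiting searches, one per field, each returning the first truthy score within the inning threshold.
import Mathlib
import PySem

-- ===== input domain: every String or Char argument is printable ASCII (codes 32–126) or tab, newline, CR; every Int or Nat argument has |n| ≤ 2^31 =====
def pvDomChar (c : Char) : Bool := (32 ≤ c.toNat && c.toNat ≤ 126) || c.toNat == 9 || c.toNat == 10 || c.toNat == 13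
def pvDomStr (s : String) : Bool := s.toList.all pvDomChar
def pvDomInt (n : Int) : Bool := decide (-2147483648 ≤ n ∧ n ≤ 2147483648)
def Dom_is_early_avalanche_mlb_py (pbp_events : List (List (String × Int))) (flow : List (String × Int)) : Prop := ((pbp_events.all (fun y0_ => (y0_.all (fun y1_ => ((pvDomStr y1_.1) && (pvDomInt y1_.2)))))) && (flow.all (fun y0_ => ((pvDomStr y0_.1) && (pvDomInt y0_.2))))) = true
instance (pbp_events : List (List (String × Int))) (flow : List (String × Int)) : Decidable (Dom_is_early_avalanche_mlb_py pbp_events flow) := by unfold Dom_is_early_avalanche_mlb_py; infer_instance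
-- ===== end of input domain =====

-- B replaces A's forward loop over two accumulators with two independent backward
-- short-circuiting searches (one per score field); alternative decomposition, same cost.

-- shared first-match lookup for the association-list dicts (Python dict.get)
def pvLookup (l : List (String × Int)) (k : String) : Option Int :=
  match l with
  | [] => none
  | (k', v) :: rest => if k' == k then some v else pvLookup rest k

-- ===== PORT A =====
-- `x or d` on an optional int: truthy (some nonzero) keeps x, else d
def pvOrInt (o : Option Int) (d : Int) : Int :=
  match o with
  | some v => if v ≠ 0 then v else d
  | none => d

def is_early_avalanche_mlb_py (pbp_events : List (List (String × Int))) (flow : List (String × Int)) : Bool :=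
  let runs_threshold : Int := (pvLookup flow "early_avalanche_runs").getD 4
  let inning_threshold : Int := (pvLookup flow "early_avalanche_innings").getD 2
  let st := pbp_events.foldl (fun (st : Int × Int) ev =>
      let inning := pvOrInt (pvLookup ev "quarter") 0
      if inning ≤ inning_threshold then
        (pvOrInt (pvLookup ev "home_score") st.1, pvOrInt (pvLookup ev "away_score") st.2)
      else st) (0, 0)
  decide (st.1 ≥ runs_threshold) || decide (st.2 ≥ runs_threshold)

-- ===== PORT B =====
-- backward scan: first event (from the end) in an early inning with a truthy score
def pvLastScore (th : Int) (field : String) : List (List (String × Int)) → Int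
  | [] => 0
  | ev :: rest =>
    let v := (pvLookup ev field).getD 0
    if (pvLookup ev "quarter").getD 0 ≤ th ∧ v ≠ 0 then v
    else pvLastScore th field rest

def is_early_avalanche_mlb_py_alt (pbp_events : List (List (String × Int))) (flow : List (String × Int)) : Bool :=
  let runs_threshold : Int := (pvLookup flow "early_avalanche_runs").getD 4
  let inning_threshold : Int := (pvLookup flow "early_avalanche_innings").getD 2
  decide (pvLastScore inning_threshold "home_score" pbp_events.reverse ≥ runs_threshold) ||
  decide (pvLastScore inning_threshold "away_score" pbp_events.reverse ≥ runs_threshold)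

-- ===== PRECONDITION & SPEC =====
def Spec_is_early_avalanche_mlb_py (pbp_events : List (List (String × Int))) (flow : List (String × Int)) (out : Bool) : Prop := out = is_early_avalanche_mlb_py_alt pbp_events flow
instance (pbp_events : List (List (String × Int))) (flow : List (String × Int)) (out : Bool) : Decidable (Spec_is_early_avalanche_mlb_py pbp_events flow out) := by unfold Spec_is_early_avalanche_mlb_py; infer_instance

-- ===== CLAIM =====
def Claim_equal_is_early_avalanche_mlb_py : Prop := ∀ (pbp_events : List (List (String × Int))) (flow : List (String × Int)), Dom_is_early_avalanche_mlb_py pbp_events flow → Spec_is_early_avalanche_mlb_py pbp_events flow (is_early_avalanche_mlb_py pbp_events flow)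

-- ===== LEMMAS AND PROOFS =====

-- single-field forward step, matching A's per-component update
def pvStep (th : Int) (field : String) (acc : Int) (ev : List (String × Int)) : Int :=
  if pvOrInt (pvLookup ev "quarter") 0 ≤ th then pvOrInt (pvLookup ev field) acc else acc

-- the `(quarter or 0)` coercion agrees with getD 0 for the ≤-test
theorem pvOrInt_quarter (o : Option Int) : pvOrInt o 0 = o.getD 0 := by
  cases o with
  | none => rfl
  | some v => by_cases h : v = 0 <;> simp [pvOrInt, h]

-- A's pair fold splits into two independent single-field folds
theorem foldl_pair_split (th : Int) (xs : List (List (String × Int))) :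
    ∀ h a : Int,
    xs.foldl (fun (st : Int × Int) ev =>
      if pvOrInt (pvLookup ev "quarter") 0 ≤ th then
        (pvOrInt (pvLookup ev "home_score") st.1, pvOrInt (pvLookup ev "away_score") st.2)
      else st) (h, a)
    = (xs.foldl (pvStep th "home_score") h, xs.foldl (pvStep th "away_score") a) := by
  induction xs with
  | nil => intro h a; rfl
  | cons ev rest ih =>
    intro h a
    simp only [List.foldl_cons, pvStep]
    by_cases hc : pvOrInt (pvLookup ev "quarter") 0 ≤ th <;> simp [hc, ih]

-- the backward search computes the forward single-field fold
theorem lastScore_eq_foldl (th : Int) (field : String) (ys : List (List (String × Int))) :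
    pvLastScore th field ys = ys.reverse.foldl (pvStep th field) 0 := by
  induction ys with
  | nil => rfl
  | cons ev rest ih =>
    simp only [pvLastScore, List.reverse_cons, List.foldl_append, List.foldl_cons,
      List.foldl_nil, ih, pvStep, pvOrInt_quarter]
    by_cases hq : (pvLookup ev "quarter").getD 0 ≤ th
    · cases hv : pvLookup ev field with
      | none => simp [hq, pvOrInt]
      | some v =>
        by_cases h0 : v = 0 <;> simp [hq, h0, pvOrInt]
    · simp [hq]

-- ===== VERDICT =====
theorem is_early_avalanche_mlb_py_spec : Claim_equal_is_early_avalanche_mlb_py := by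
  intro pbp_events flow _
  unfold Spec_is_early_avalanche_mlb_py is_early_avalanche_mlb_py is_early_avalanche_mlb_py_alt
  simp only [lastScore_eq_foldl, List.reverse_reverse, foldl_pair_split]
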